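-- pv_equiv track=rewrite | github.com/MrBrantCode/unitest_baseline | mut_generate/mist_train_cf/cf_58424/solution.py | brazilian_factorial
-- ===== SOURCE A (Python) =====
-- def brazilian_factorial(n):
--     """
--     Calculate the product of factorials from n! down to 1!.
--
--     Args:
--         n (int): A positive integer.
--
--     Returns:
--         int: The product of factorials from n! down to 1!.
--     """
--     result = 1
--     for i in range(1, n + 1):
--         fact = 1
--         for j in range(1, i + 1):
--             fact *= j
--         result *= fact
--     return result
-- ===== SOURCE B (Python) =====
-- def brazilian_factorial(n):
--     """Product of factorials from n! down to 1!, with the running factorial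
--     maintained incrementally in a single pass."""
--     result = 1
--     fact = 1
--     for i in range(1, n + 1):
--         fact *= i
--         result *= fact
--     return result
-- ===== Notes on version B (the rewrite author's own statement) =====
-- stated objective: simpler
-- what changed: Replaced the nested loop that recomputes i! from scratch for every i with a single pass maintaining the running factorial incrementally.
import Mathlib
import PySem

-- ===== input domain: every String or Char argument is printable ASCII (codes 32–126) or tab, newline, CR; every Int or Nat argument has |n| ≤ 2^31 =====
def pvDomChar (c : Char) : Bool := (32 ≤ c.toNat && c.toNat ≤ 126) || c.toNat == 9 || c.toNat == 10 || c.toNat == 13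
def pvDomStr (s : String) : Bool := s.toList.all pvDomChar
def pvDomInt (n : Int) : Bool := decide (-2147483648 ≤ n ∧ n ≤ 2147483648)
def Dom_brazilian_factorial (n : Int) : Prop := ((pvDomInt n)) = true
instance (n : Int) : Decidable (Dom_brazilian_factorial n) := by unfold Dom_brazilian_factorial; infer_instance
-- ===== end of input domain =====

-- B replaces A's nested loop (i! recomputed from scratch for every i) with one pass
-- maintaining the running factorial; objective: simpler (one pass instead of nested loops).

-- ===== PORT A =====
def brazilian_factorial (n : Int) : Int :=
  (PySem.List.pyRange 1 (n + 1) 1).foldl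
    (fun result i =>
      result * ((PySem.List.pyRange 1 (i + 1) 1).foldl (fun fact j => fact * j) 1))
    1

-- ===== PORT B =====
def brazilian_factorial_alt (n : Int) : Int :=
  ((PySem.List.pyRange 1 (n + 1) 1).foldl
    (fun (st : Int × Int) i =>
      let fact := st.1 * i
      (fact, st.2 * fact))
    (1, 1)).2

-- ===== PRECONDITION & SPEC =====
def Spec_brazilian_factorial (n : Int) (out : Int) : Prop := out = brazilian_factorial_alt n
instance (n : Int) (out : Int) : Decidable (Spec_brazilian_factorial n out) := by unfold Spec_brazilian_factorial; infer_instance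

-- ===== CLAIM (what is proved, stated in full; the proofs are below) =====
def Claim_equal_brazilian_factorial : Prop := ∀ (n : Int), Dom_brazilian_factorial n → Spec_brazilian_factorial n (brazilian_factorial n)

-- ===== LEMMAS AND PROOFS =====

-- A's inner loop: i! computed from scratch.
def pvInnerFact (i : Int) : Int :=
  (PySem.List.pyRange 1 (i + 1) 1).foldl (fun fact j => fact * j) 1

-- Invariant: over [1..m], B's fold carries (m!, A's result for m).
theorem pvState_eq (m : Nat) :
    ((PySem.List.pyRange 1 ((m : Int) + 1) 1).foldl
      (fun (st : Int × Int) i => let fact := st.1 * i; (fact, st.2 * fact)) (1, 1))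
    = (pvInnerFact (m : Int),
       (PySem.List.pyRange 1 ((m : Int) + 1) 1).foldl
         (fun result i => result * pvInnerFact i) 1) := by
  induction m with
  | zero =>
      simp [PySem.List.pyRange_one_eq_nil (by norm_num : (1:Int) ≤ 1), pvInnerFact]
  | succ k ih =>
      have h1 : (1 : Int) ≤ (k : Int) + 1 := by omega
      have hsplit : PySem.List.pyRange 1 ((k : Int) + 1 + 1) 1
          = PySem.List.pyRange 1 ((k : Int) + 1) 1 ++ [(k : Int) + 1] :=
        PySem.List.pyRange_one_succ_right h1
      have hfact : pvInnerFact ((k : Int) + 1) = pvInnerFact (k : Int) * ((k : Int) + 1) := by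
        unfold pvInnerFact
        rw [hsplit, List.foldl_append]
        simp
      push_cast
      rw [hsplit, List.foldl_append, List.foldl_append, ih, hfact]
      simp
      exact Or.inl hfact.symm

theorem pvNeg_case (n : Int) (h : n ≤ 0) :
    brazilian_factorial n = brazilian_factorial_alt n := by
  unfold brazilian_factorial brazilian_factorial_alt
  rw [PySem.List.pyRange_one_eq_nil (by omega : n + 1 ≤ 1)]
  simp

-- ===== VERDICT (by name: the statement is the Claim_ definition above) =====
theorem brazilian_factorial_spec : Claim_equal_brazilian_factorial := by
  intro n _
  unfold Spec_brazilian_factorial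
  rcases le_or_gt n 0 with h | h
  · exact pvNeg_case n h
  · obtain ⟨m, rfl⟩ : ∃ m : Nat, n = (m : Int) :=
      ⟨n.toNat, (Int.toNat_of_nonneg h.le).symm⟩
    unfold brazilian_factorial brazilian_factorial_alt
    rw [pvState_eq m]
    rfl
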